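-- pv_equiv track=rewrite | github.com/TamaTK/PP2807ICT | Workshop 8/problem2.py | list_compare
-- ===== SOURCE A (Python) =====
-- def list_compare(list1, list2):             # Function iterates through two lists, if any elements are the same in
--     new_list = []                           # either list, those elements will be appended to a new list.
--     for i in range(len(list1)):             # Function returns new list.
--         for j in range(len(list2)):
--             if list1[i] == list2[j]:
--                 new_list.append(list1[i])
--             else:
--                 pass
--     return new_list
-- ===== SOURCE B (Python) =====
-- def list_compare(list1, list2):
--     counts = {}
--     for y in list2:
--         counts[y] = counts.get(y, 0) + 1
--     chunks = {v: [v] * c for v, c in counts.items()}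
--     new_list = []
--     for x in list1:
--         new_list += chunks.get(x, [])
--     return new_list
-- ===== Notes on version B (the rewrite author's own statement) =====
-- stated objective: faster
-- what changed: Replaces the nested O(n*m) element-by-element scan with a one-pass count dictionary over list2 and a precomputed chunk ([v]*count) per distinct value, emitting each list1 element's chunk.
import Mathlib
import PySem

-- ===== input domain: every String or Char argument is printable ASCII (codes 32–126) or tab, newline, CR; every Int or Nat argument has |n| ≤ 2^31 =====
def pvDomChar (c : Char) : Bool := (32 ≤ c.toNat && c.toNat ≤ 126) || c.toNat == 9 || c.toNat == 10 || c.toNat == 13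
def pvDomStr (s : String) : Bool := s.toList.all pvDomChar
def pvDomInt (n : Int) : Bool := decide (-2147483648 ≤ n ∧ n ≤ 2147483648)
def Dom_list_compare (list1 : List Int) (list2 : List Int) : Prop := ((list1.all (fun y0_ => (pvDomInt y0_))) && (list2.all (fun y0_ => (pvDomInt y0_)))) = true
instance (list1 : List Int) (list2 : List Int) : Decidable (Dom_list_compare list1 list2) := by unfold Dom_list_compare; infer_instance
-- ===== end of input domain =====

-- B replaces A's nested element-by-element scan with a count dictionary over list2
-- plus a precomputed chunk per distinct value, then emits each list1 element's chunk.

-- ===== PORT A =====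
def list_compare (list1 : List Int) (list2 : List Int) : List Int :=
  (PySem.List.pyRange 0 list1.length 1).foldl (fun new_list i =>
    (PySem.List.pyRange 0 list2.length 1).foldl (fun nl j =>
      if PySem.List.pyGetD list1 i 0 == PySem.List.pyGetD list2 j 0 then
        nl ++ [PySem.List.pyGetD list1 i 0]
      else nl) new_list) []

-- ===== PORT B =====
def list_compare_alt (list1 : List Int) (list2 : List Int) : List Int :=
  let counts : PySem.Dict Int Int :=
    list2.foldl (fun d y => d.insert y (d.getD y 0 + 1)) PySem.Dict.empty
  let chunks : PySem.Dict Int (List Int) :=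
    counts.items.foldl (fun d p => d.insert p.1 (PySem.List.pyRepeat [p.1] p.2)) PySem.Dict.empty
  list1.foldl (fun new_list x => new_list ++ chunks.getD x []) []

-- ===== PRECONDITION & SPEC =====
def Spec_list_compare (list1 : List Int) (list2 : List Int) (out : List Int) : Prop := out = list_compare_alt list1 list2
instance (list1 : List Int) (list2 : List Int) (out : List Int) : Decidable (Spec_list_compare list1 list2 out) := by unfold Spec_list_compare; infer_instance

-- ===== CLAIM (what is proved, stated in full; the proofs are below) =====
def Claim_equal_list_compare : Prop := ∀ (list1 : List Int) (list2 : List Int), Dom_list_compare list1 list2 → Spec_list_compare list1 list2 (list_compare list1 list2)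

-- ===== LEMMAS AND PROOFS =====

-- A's inner loop over list2 appends (list2.count x) copies of x.
lemma inner_loop_eq (x : Int) (l2 : List Int) (acc : List Int) :
    l2.foldl (fun nl y => if x == y then nl ++ [x] else nl) acc
      = acc ++ List.replicate (l2.count x) x := by
  rw [PySem.List.foldl_append_if (p := fun y => x == y) (f := fun _ => x)]
  have h : l2.filter (fun y => x == y) = l2.filter (fun y => y == x) := by
    apply List.filter_congr; intro y _; simp [eq_comm]
  rw [h, List.map_const']
  congr 1
  simp [List.count_eq_length_filter]

-- a fold inserting a key-determined value: lookup = the function on a seen key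
lemma getD_foldl_insert_fn (s : List Int) (f : Int → List Int) (x : Int)
    (d : PySem.Dict Int (List Int)) :
    (s.foldl (fun d k => d.insert k (f k)) d).getD x []
      = if x ∈ s then f x else d.getD x [] := by
  induction s generalizing d with
  | nil => simp
  | cons a t ih =>
    simp only [List.foldl_cons, ih, List.mem_cons, PySem.Dict.getD_insert]
    by_cases hx : x ∈ t
    · simp [hx]
    · by_cases hxa : x = a <;> simp [hx, hxa]

-- B's chunk dictionary maps x to (list2.count x) copies of x.
lemma chunks_getD (l2 : List Int) (x : Int) :
    (((PySem.Dict.counter l2).items).foldl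
        (fun d p => d.insert p.1 (PySem.List.pyRepeat [p.1] p.2))
        PySem.Dict.empty).getD x []
      = List.replicate (l2.count x) x := by
  rw [PySem.Dict.items_counter, List.foldl_map]
  rw [getD_foldl_insert_fn (PySem.Set.ofList l2)
        (fun k => PySem.List.pyRepeat [k] ((l2.count k : Int))) x PySem.Dict.empty]
  by_cases hx : x ∈ l2
  · rw [if_pos ((PySem.Set.mem_ofList _ _).mpr hx), PySem.List.pyRepeat_singleton]
    simp
  · rw [if_neg (fun h => hx ((PySem.Set.mem_ofList _ _).mp h))]
    simp [List.count_eq_zero_of_not_mem hx]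

lemma both_eq (l1 l2 : List Int) :
    list_compare l1 l2 = list_compare_alt l1 l2 := by
  unfold list_compare
  simp only [list_compare_alt]
  rw [PySem.Dict.foldl_insert_getD_add_one_eq_counter]
  rw [PySem.List.foldl_pyRange_zero_pyGetD' l1 0
        (fun nl x => (PySem.List.pyRange 0 (l2.length : Int) 1).foldl
          (fun a j => if x == PySem.List.pyGetD l2 j 0 then a ++ [x] else a) nl) []]
  apply PySem.List.foldl_congr_mem
  intro acc x _
  rw [PySem.List.foldl_pyRange_zero_pyGetD' l2 0
        (fun a y => if x == y then a ++ [x] else a) acc]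
  rw [inner_loop_eq, chunks_getD]

-- ===== VERDICT (by name: the statement is the Claim_ definition above) =====
theorem list_compare_spec : Claim_equal_list_compare := by
  intro l1 l2 _
  unfold Spec_list_compare
  exact both_eq l1 l2
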